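-- pv_equiv track=rewrite | github.com/RobertKilkenny/Course-Tracker | src/Functions/AddClass.py | read_user_errors
-- ===== SOURCE A (Python) =====
-- from typing import List
--
-- def read_user_errors(list: List[int]) -> str:
--   report = ""
--   for number in list:
--     match number:
--       case 0:
--         report += "- Course Code is not complete"
--       case 1:
--         report += "- Course name is not long enough"
--       case 2:
--         report += "- Course credits were not given"
--       case 3:
--         report += "- Course credits are not greater than 0"
--       case 4:
--         report += "- Course code already exists"
--       case _:
--         report += "- Create class tester gave invalid error!!!!"
--     report += "\n"
--   return report
-- ===== SOURCE B (Python) =====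
-- from typing import List
--
-- _MSGS = (
--     "- Course Code is not complete",
--     "- Course name is not long enough",
--     "- Course credits were not given",
--     "- Course credits are not greater than 0",
--     "- Course code already exists",
-- )
-- _INVALID = "- Create class tester gave invalid error!!!!"
--
-- def read_user_errors(list: List[int]) -> str:
--   # Divide-and-conquer: the report of a list is the report of its left half
--   # followed by the report of its right half (concatenation of per-code lines
--   # is associative), with single codes resolved by tuple indexing.
--   n = len(list)
--   if n == 0:
--     return ""
--   if n == 1:
--     code = list[0]
--     return (_MSGS[code] if 0 <= code < 5 else _INVALID) + "\n"
--   mid = n // 2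
--   return read_user_errors(list[:mid]) + read_user_errors(list[mid:])
-- ===== Notes on version B (the rewrite author's own statement) =====
-- stated objective: alternative
-- what changed: Replaces the left-to-right accumulator loop with six match branches by a divide-and-conquer recursion that splits the list in halves and concatenates the two sub-reports, resolving single codes by bounds-checked tuple indexing; correct because concatenation of per-code lines is associative.
import Mathlib
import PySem

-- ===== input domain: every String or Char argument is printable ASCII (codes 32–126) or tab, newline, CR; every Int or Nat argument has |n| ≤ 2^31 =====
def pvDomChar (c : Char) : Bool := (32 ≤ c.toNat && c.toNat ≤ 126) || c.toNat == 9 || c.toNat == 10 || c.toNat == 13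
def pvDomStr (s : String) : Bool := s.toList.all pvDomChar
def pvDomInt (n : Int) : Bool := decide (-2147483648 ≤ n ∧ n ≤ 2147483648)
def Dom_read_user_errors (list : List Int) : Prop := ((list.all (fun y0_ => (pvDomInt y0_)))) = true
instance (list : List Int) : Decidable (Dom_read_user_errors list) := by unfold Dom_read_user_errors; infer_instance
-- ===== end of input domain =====

-- B replaces the accumulator loop over a six-branch match by a divide-and-conquer
-- recursion (split in halves, concatenate sub-reports, tuple indexing for one code);
-- objective: alternative.

-- ===== PORT A =====
def read_user_errors (list : List Int) : String :=
  list.foldl (fun report number =>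
    (report ++
      (match number with
       | 0 => "- Course Code is not complete"
       | 1 => "- Course name is not long enough"
       | 2 => "- Course credits were not given"
       | 3 => "- Course credits are not greater than 0"
       | 4 => "- Course code already exists"
       | _ => "- Create class tester gave invalid error!!!!")) ++ "\n") ""

-- ===== PORT B =====
def pvMsgs : List String :=
  ["- Course Code is not complete",
   "- Course name is not long enough",
   "- Course credits were not given",
   "- Course credits are not greater than 0",
   "- Course code already exists"]

def pvInvalid : String := "- Create class tester gave invalid error!!!!"

-- Source B's divide-and-conquer: list[:mid] / list[mid:] with 0 ≤ mid ≤ len are exactly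
-- take mid / drop mid; _MSGS[code] is guarded by 0 <= code < 5, so pyGet? is in range
-- (the .getD pvInvalid default is never taken under the guard).
def read_user_errors_alt (list : List Int) : String :=
  if _h0 : list.length = 0 then ""
  else if _h1 : list.length = 1 then
    let code := (PySem.List.pyGet? list 0).getD 0
    (if 0 ≤ code ∧ code < 5 then (PySem.List.pyGet? pvMsgs code).getD pvInvalid
     else pvInvalid) ++ "\n"
  else
    let mid := list.length / 2
    read_user_errors_alt (list.take mid) ++ read_user_errors_alt (list.drop mid)
termination_by list.length
decreasing_by
  · simp [List.length_take]; omega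
  · simp [List.length_drop]; omega

-- ===== PRECONDITION & SPEC =====
def Spec_read_user_errors (list : List Int) (out : String) : Prop := out = read_user_errors_alt list
instance (list : List Int) (out : String) : Decidable (Spec_read_user_errors list out) := by unfold Spec_read_user_errors; infer_instance

-- ===== CLAIM (what is proved, stated in full; the proofs are below) =====
def Claim_equal_read_user_errors : Prop := ∀ (list : List Int), Dom_read_user_errors list → Spec_read_user_errors list (read_user_errors list)

-- ===== LEMMAS AND PROOFS =====

-- the line B produces for one code
def pvLineB (code : Int) : String :=
  (if 0 ≤ code ∧ code < 5 then (PySem.List.pyGet? pvMsgs code).getD pvInvalid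
   else pvInvalid) ++ "\n"

-- the whole report as a right fold of per-code lines
def pvFlat (l : List Int) : String := l.foldr (fun n s => pvLineB n ++ s) ""

theorem pvLineB_eq (n : Int) :
    pvLineB n =
      (match n with
       | 0 => "- Course Code is not complete"
       | 1 => "- Course name is not long enough"
       | 2 => "- Course credits were not given"
       | 3 => "- Course credits are not greater than 0"
       | 4 => "- Course code already exists"
       | _ => "- Create class tester gave invalid error!!!!") ++ "\n" := by
  by_cases h0 : n = 0
  · subst h0; decide
  by_cases h1 : n = 1
  · subst h1; decide
  by_cases h2 : n = 2
  · subst h2; decide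
  by_cases h3 : n = 3
  · subst h3; decide
  by_cases h4 : n = 4
  · subst h4; decide
  · have hg : ¬ (0 ≤ n ∧ n < 5) := by omega
    have hb : pvLineB n = pvInvalid ++ "\n" := by simp [pvLineB, hg]
    rw [hb]
    match n, h0, h1, h2, h3, h4 with
    | Int.ofNat 0, h0, _, _, _, _ => exact absurd rfl h0
    | Int.ofNat 1, _, h1, _, _, _ => exact absurd rfl h1
    | Int.ofNat 2, _, _, h2, _, _ => exact absurd rfl h2
    | Int.ofNat 3, _, _, _, h3, _ => exact absurd rfl h3
    | Int.ofNat 4, _, _, _, _, h4 => exact absurd rfl h4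
    | Int.ofNat (m+5), _, _, _, _, _ => rfl
    | Int.negSucc m, _, _, _, _, _ => rfl

theorem pvFlat_append (a b : List Int) : pvFlat (a ++ b) = pvFlat a ++ pvFlat b := by
  induction a with
  | nil => simp [pvFlat]
  | cons x xs ih => simp [pvFlat, List.foldr_cons] at ih ⊢; rw [ih, String.append_assoc]

theorem pvAlt_eq_flat : ∀ (k : Nat) (l : List Int), l.length = k →
    read_user_errors_alt l = pvFlat l := by
  intro k
  induction k using Nat.strong_induction_on with
  | _ k ih =>
    intro l hl
    rw [read_user_errors_alt]
    by_cases h0 : l.length = 0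
    · simp [List.eq_nil_of_length_eq_zero h0, pvFlat]
    by_cases h1 : l.length = 1
    · obtain ⟨n, rfl⟩ : ∃ n, l = [n] := by
        match l, h1 with | [n], _ => exact ⟨n, rfl⟩
      simp [pvFlat, pvLineB, PySem.List.pyGet?, PySem.List.pyIdx?]
    · simp [h0, h1]
      have hmidlt : l.length / 2 < l.length := by omega
      have hmidpos : 1 ≤ l.length / 2 := by omega
      have ht : (l.take (l.length / 2)).length < k := by
        simp [List.length_take]; omega
      have hd : (l.drop (l.length / 2)).length < k := by
        simp [List.length_drop]; omega
      rw [ih _ ht _ rfl, ih _ hd _ rfl, ← pvFlat_append, List.take_append_drop]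

theorem pvFold_eq_flat (l : List Int) (acc : String) :
    l.foldl (fun report number =>
      (report ++
        (match number with
         | 0 => "- Course Code is not complete"
         | 1 => "- Course name is not long enough"
         | 2 => "- Course credits were not given"
         | 3 => "- Course credits are not greater than 0"
         | 4 => "- Course code already exists"
         | _ => "- Create class tester gave invalid error!!!!")) ++ "\n") acc
    = acc ++ pvFlat l := by
  induction l generalizing acc with
  | nil => simp [pvFlat]
  | cons n rest ih =>
    rw [List.foldl_cons, ih]
    simp [pvFlat, List.foldr_cons, ← pvLineB_eq, String.append_assoc]

-- ===== VERDICT (by name: the statement is the Claim_ definition above) =====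
theorem read_user_errors_spec : Claim_equal_read_user_errors := by
  intro list _
  show read_user_errors list = read_user_errors_alt list
  rw [read_user_errors, pvFold_eq_flat, pvAlt_eq_flat list.length list rfl]
  simp
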